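-- pv_equiv track=rewrite | github.com/sleebapaul/codeforces | sliding_window/num_nice_arrays.py | helper
-- ===== SOURCE A (Python) =====
-- def helper(nums, k):
--
--     window_start = 0
--     result = 0
--     match = 0
--
--     for window_end in range(len(nums)):
--
--         if nums[window_end] %2 == 1:
--             match += 1
--
--         while match > k:
--             if nums[window_start]%2 == 1:
--                 match -= 1
--
--             window_start += 1
--
--         result += (window_end - window_start)
--
--     return result
-- ===== SOURCE B (Python) =====
-- def helper(nums, k):
--     n = len(nums)
--     result = 0
--     for j in range(n):
--         cnt = 1 if nums[j] % 2 == 1 else 0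
--         for i in range(j - 1, -1, -1):
--             if nums[i] % 2 == 1:
--                 cnt += 1
--             if cnt <= k:
--                 result += 1
--     return result
-- ===== Notes on version B (the rewrite author's own statement) =====
-- stated objective: alternative
-- what changed: Replaces the amortized sliding window (window_start/match state carried across iterations with an inner while advancing the left edge) by an explicit brute force: for each subarray end, a backward scan recounting odd elements and counting every qualifying start.
-- intended difference: When k = 0 and nums contains odd elements, A returns a negative total (its window start overtakes the window end, adding -1 for every odd element) while B returns the true count of length-at-least-2 subarrays with at most k odd elements, which is the intended value. — e.g. on helper([1], 0): A returns -1, B returns 0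
import Mathlib
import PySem

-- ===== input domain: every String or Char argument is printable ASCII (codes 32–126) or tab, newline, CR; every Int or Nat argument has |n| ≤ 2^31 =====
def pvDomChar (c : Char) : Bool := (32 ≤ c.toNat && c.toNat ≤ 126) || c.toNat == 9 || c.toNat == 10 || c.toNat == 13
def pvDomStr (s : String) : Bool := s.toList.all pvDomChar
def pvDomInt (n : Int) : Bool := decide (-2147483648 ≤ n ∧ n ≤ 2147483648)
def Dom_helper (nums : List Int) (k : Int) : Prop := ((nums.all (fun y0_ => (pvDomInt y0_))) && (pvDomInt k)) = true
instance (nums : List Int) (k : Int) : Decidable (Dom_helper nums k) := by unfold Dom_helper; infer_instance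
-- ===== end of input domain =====

-- B replaces A's amortized sliding window by an explicit per-end backward brute-force scan
-- (an alternative algorithm, not faster); where A returns a negative "count" (k = 0 with odd
-- elements present) B returns the intended nonnegative count (see D_helper below).


-- ===== PORT A =====
-- A's inner 'while match > k:' loop, state (window_start, match); the 'none' branch is where
-- Python raises IndexError (excluded by Pre_helper)
def helperWhile (nums : List Int) (k : Int) (ws : Nat) (m : Int) : Nat × Int :=
  if m > k then
    match h : PySem.List.pyGet? nums (ws : Int) with
    | some v => helperWhile nums k (ws + 1) (if PySem.Int.mod v 2 == 1 then m - 1 else m)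
    | none => (ws, m)   -- IndexError in Python
  else (ws, m)
termination_by nums.length - ws
decreasing_by
  simp only [PySem.List.pyGet?_natCast] at h
  have hlt : ws < nums.length := by
    rcases Nat.lt_or_ge ws nums.length with h' | h'
    · exact h'
    · simp [List.getElem?_eq_none h'] at h
  omega

-- one iteration of A's 'for window_end in range(len(nums))' loop; state (window_start, result, match)
def helperStep (nums : List Int) (k : Int) (st : Nat × Int × Int) (we : Nat) : Nat × Int × Int :=
  let m1 := if PySem.Int.mod ((PySem.List.pyGet? nums (we : Int)).getD 0) 2 == 1 then st.2.2 + 1 else st.2.2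
  let p := helperWhile nums k st.1 m1
  (p.1, st.2.1 + ((we : Int) - (p.1 : Int)), p.2)

def helper (nums : List Int) (k : Int) : Int :=
  ((List.range nums.length).foldl (helperStep nums k) (0, 0, 0)).2.1

-- ===== PORT B =====
-- one iteration of B's inner 'for i in range(j - 1, -1, -1)' loop; state (cnt, result)
def helperAltInner (nums : List Int) (k : Int) (st : Int × Int) (i : Int) : Int × Int :=
  let cnt := if PySem.Int.mod ((PySem.List.pyGet? nums i).getD 0) 2 == 1 then st.1 + 1 else st.1
  (cnt, if cnt ≤ k then st.2 + 1 else st.2)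

def helper_alt (nums : List Int) (k : Int) : Int :=
  (List.range nums.length).foldl (fun result (j : Nat) =>
    let cnt0 : Int := if PySem.Int.mod ((PySem.List.pyGet? nums (j : Int)).getD 0) 2 == 1 then 1 else 0
    ((PySem.List.pyRange ((j : Int) - 1) (-1) (-1)).foldl (helperAltInner nums k) (cnt0, result)).2) 0

-- ===== PRECONDITION & SPEC =====
-- Pre_ excludes exactly the inputs where Python A raises IndexError: k < 0 with nonempty nums
-- (window_start runs past the end of the array while match stays above k).
def Pre_helper (nums : List Int) (k : Int) : Prop := 0 ≤ k ∨ nums = []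
instance (nums : List Int) (k : Int) : Decidable (Pre_helper nums k) := by unfold Pre_helper; infer_instance
def pvWitness_helper : List Int × Int := ([2, 1, 4], 1)

-- When k = 0 and nums contains odd elements, A returns a negative total (its window start
-- overtakes the window end, adding -1 for every odd element) while B returns the true count of
-- length-≥2 subarrays with at most k odd elements, which is the intended value.
def D_helper (nums : List Int) (k : Int) : Prop :=
  k = 0 ∧ nums.any (fun x => PySem.Int.mod x 2 == 1)
instance (nums : List Int) (k : Int) : Decidable (D_helper nums k) := by unfold D_helper; infer_instance

def Spec_helper (nums : List Int) (k : Int) (out : Int) : Prop := ¬ D_helper nums k → out = helper_alt nums k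
instance (nums : List Int) (k : Int) (out : Int) : Decidable (Spec_helper nums k out) := by unfold Spec_helper; infer_instance

def pvDiffWitness_helper : List Int × Int := ([1], 0)
def pvDiffWitnessOut_helper : Int × Int := (-1, 0)

-- ===== CLAIM (what is proved, stated in full; the proofs are below) =====
def Claim_unchanged_helper : Prop := ∀ (nums : List Int) (k : Int), Dom_helper nums k → Pre_helper nums k → Spec_helper nums k (helper nums k)
def Claim_changed_helper : Prop := Dom_helper (pvDiffWitness_helper.1) (pvDiffWitness_helper.2) ∧ Pre_helper (pvDiffWitness_helper.1) (pvDiffWitness_helper.2) ∧ D_helper (pvDiffWitness_helper.1) (pvDiffWitness_helper.2) ∧ helper (pvDiffWitness_helper.1) (pvDiffWitness_helper.2) = pvDiffWitnessOut_helper.1 ∧ helper_alt (pvDiffWitness_helper.1) (pvDiffWitness_helper.2) = pvDiffWitnessOut_helper.2 ∧ pvDiffWitnessOut_helper.1 ≠ pvDiffWitnessOut_helper.2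
def Claim_exact_helper : Prop := ∀ (nums : List Int) (k : Int), Dom_helper nums k → Pre_helper nums k → D_helper nums k → helper nums k ≠ helper_alt nums k

-- ===== LEMMAS AND PROOFS =====

-- number of odd elements (Python's x % 2 == 1 test) among the first t elements
def oddPfx (nums : List Int) (t : Nat) : Int :=
  ((nums.take t).countP (fun x => PySem.Int.mod x 2 == 1) : Int)

lemma oddPfx_mono (nums : List Int) {s t : Nat} (h : s ≤ t) : oddPfx nums s ≤ oddPfx nums t := by
  unfold oddPfx
  have hs : List.Sublist (nums.take s) (nums.take t) := List.take_sublist_take_left h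
  exact_mod_cast hs.countP_le

lemma oddPfx_succ (nums : List Int) {t : Nat} (h : t < nums.length) :
    oddPfx nums (t + 1) = oddPfx nums t + (if PySem.Int.mod nums[t] 2 == 1 then 1 else 0) := by
  unfold oddPfx
  rw [List.take_add_one, List.getElem?_eq_getElem h]
  rw [List.countP_append]
  by_cases hb : PySem.Int.mod nums[t] 2 == 1 <;> simp

lemma oddPfx_lt_imp (nums : List Int) {s t : Nat} (h : oddPfx nums s < oddPfx nums t) : s < t := by
  by_contra hc
  exact absurd (oddPfx_mono nums (Nat.le_of_not_lt hc)) (not_le.mpr h)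

-- A's inner while loop finds the leftmost window start with at most k odd elements
lemma while_spec (nums : List Int) (k : Int) (hk : 0 ≤ k) (t : Nat) (ht : t ≤ nums.length) :
    ∀ fuel ws, t - ws ≤ fuel → ws ≤ t →
    ∃ ws', helperWhile nums k ws (oddPfx nums t - oddPfx nums ws) = (ws', oddPfx nums t - oddPfx nums ws') ∧
      ws ≤ ws' ∧ ws' ≤ t ∧ oddPfx nums t - oddPfx nums ws' ≤ k ∧
      ∀ s, ws ≤ s → s < ws' → k < oddPfx nums t - oddPfx nums s := by
  intro fuel
  induction fuel with
  | zero =>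
    intro ws hf hws
    have hwt : ws = t := by omega
    refine ⟨ws, ?_, le_refl _, hws, ?_, fun s h1 h2 => absurd h1 (by omega)⟩
    · rw [helperWhile]
      have : ¬ (oddPfx nums t - oddPfx nums ws > k) := by subst hwt; omega
      simp [this]
    · subst hwt; omega
  | succ n ih =>
    intro ws hf hws
    by_cases hgt : oddPfx nums t - oddPfx nums ws > k
    · have hlt : ws < t := by
        have : oddPfx nums ws < oddPfx nums t := by omega
        exact oddPfx_lt_imp nums this
      have hwl : ws < nums.length := lt_of_lt_of_le hlt ht
      have hget : PySem.List.pyGet? nums (ws : Int) = some nums[ws] := by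
        simp [PySem.List.pyGet?_natCast, List.getElem?_eq_getElem hwl]
      have hm' : (if PySem.Int.mod nums[ws] 2 == 1 then (oddPfx nums t - oddPfx nums ws) - 1
            else oddPfx nums t - oddPfx nums ws) = oddPfx nums t - oddPfx nums (ws + 1) := by
        rw [oddPfx_succ nums hwl]
        split <;> omega
      obtain ⟨ws', heq, h1, h2, h3, h4⟩ := ih (ws + 1) (by omega) (by omega)
      refine ⟨ws', ?_, by omega, h2, h3, ?_⟩
      · rw [helperWhile]
        simp only [hgt, if_true]
        split
        · rename_i v hv
          rw [hget] at hv
          injection hv with hv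
          subst hv
          rw [hm']
          exact heq
        · rename_i hv
          rw [hget] at hv
          exact absurd hv (by simp)
      · intro s hs1 hs2
        rcases Nat.eq_or_lt_of_le hs1 with rfl | hlt'
        · omega
        · exact h4 s hlt' hs2
    · refine ⟨ws, ?_, le_refl _, hws, by omega, fun s h1 h2 => absurd h1 (by omega)⟩
      rw [helperWhile]; simp [hgt]

-- B's inner backward scan counts the starts i < t whose window [i, e] has at most k odds
lemma innerB_spec (nums : List Int) (k : Int) (e : Nat) (he : e < nums.length) :
    ∀ t : Nat, t ≤ e → ∀ r : Int,
    ((PySem.List.pyRange ((t : Int) - 1) (-1) (-1)).foldl (helperAltInner nums k)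
        (oddPfx nums (e + 1) - oddPfx nums t, r)).2
      = r + ((List.range t).countP (fun i => decide (oddPfx nums (e + 1) - oddPfx nums i ≤ k)) : Int) := by
  intro t
  induction t with
  | zero =>
    intro _ r
    rw [PySem.List.pyRange_neg_one_eq_nil (by norm_num)]
    simp
  | succ t ih =>
    intro hte r
    have h1 : ((t + 1 : Nat) : Int) - 1 = (t : Nat) := by push_cast; ring
    rw [h1, PySem.List.pyRange_neg_one_cons (by omega)]
    have htl : t < nums.length := by omega
    have hget : (PySem.List.pyGet? nums (t : Int)).getD 0 = nums[t] := by
      simp [PySem.List.pyGet?_natCast, List.getElem?_eq_getElem htl]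
    have hcnt : (if PySem.Int.mod ((PySem.List.pyGet? nums (t : Int)).getD 0) 2 == 1
        then (oddPfx nums (e + 1) - oddPfx nums (t + 1)) + 1
        else oddPfx nums (e + 1) - oddPfx nums (t + 1)) = oddPfx nums (e + 1) - oddPfx nums t := by
      rw [hget, oddPfx_succ nums htl]
      split <;> omega
    have hstep : helperAltInner nums k (oddPfx nums (e + 1) - oddPfx nums (t + 1), r) (t : Int)
        = (oddPfx nums (e + 1) - oddPfx nums t,
            if oddPfx nums (e + 1) - oddPfx nums t ≤ k then r + 1 else r) := by
      unfold helperAltInner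
      simp only []
      rw [hcnt]
    rw [List.foldl_cons, hstep, ih (by omega) _]
    rw [List.range_succ, List.countP_append]
    simp only [List.countP_cons, List.countP_nil]
    by_cases hc : oddPfx nums (e + 1) - oddPfx nums t ≤ k <;> simp [hc] <;> omega

-- B's per-end contribution
def bCnt (nums : List Int) (k : Int) (e : Nat) : Int :=
  ((List.range e).countP (fun i => decide (oddPfx nums (e + 1) - oddPfx nums i ≤ k)) : Int)

lemma helper_alt_loop (nums : List Int) (k : Int) :
    ∀ t, t ≤ nums.length → ∀ r : Int,
    (List.range t).foldl (fun result (j : Nat) =>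
      let cnt0 : Int := if PySem.Int.mod ((PySem.List.pyGet? nums (j : Int)).getD 0) 2 == 1 then 1 else 0
      ((PySem.List.pyRange ((j : Int) - 1) (-1) (-1)).foldl (helperAltInner nums k) (cnt0, result)).2) r
    = r + ((List.range t).map (bCnt nums k)).sum := by
  intro t
  induction t with
  | zero => intro _ r; simp
  | succ t ih =>
    intro ht r
    rw [List.range_succ, List.foldl_append, ih (by omega) r, List.foldl_cons, List.foldl_nil]
    simp only []
    have htl : t < nums.length := by omega
    have hget : (PySem.List.pyGet? nums (t : Int)).getD 0 = nums[t] := by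
      simp [PySem.List.pyGet?_natCast, List.getElem?_eq_getElem htl]
    have hcnt0 : (if PySem.Int.mod ((PySem.List.pyGet? nums (t : Int)).getD 0) 2 == 1 then (1:Int) else 0)
        = oddPfx nums (t + 1) - oddPfx nums t := by
      rw [hget, oddPfx_succ nums htl]; split <;> omega
    rw [hcnt0, innerB_spec nums k t htl t (le_refl t) _]
    rw [List.map_append, List.sum_append]
    simp [bCnt]
    ring

lemma helper_alt_eq (nums : List Int) (k : Int) :
    helper_alt nums k = ((List.range nums.length).map (bCnt nums k)).sum := by
  unfold helper_alt
  rw [helper_alt_loop nums k nums.length (le_refl _) 0]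
  ring

lemma countP_range_le (n m : Nat) : (List.range n).countP (fun i => decide (m ≤ i)) = n - m := by
  induction n with
  | zero => simp
  | succ n ih =>
    rw [List.range_succ, List.countP_append, ih]
    by_cases h : m ≤ n <;> simp [h] <;> omega

-- the sliding-window invariant: after t outer iterations A's result is B's partial sum, minus
-- one for every odd element seen so far when k = 0 (the overshoot A exhibits there)
lemma helper_loop_inv (nums : List Int) (k : Int) (hk : 0 ≤ k) :
    ∀ t, t ≤ nums.length →
    ((List.range t).foldl (helperStep nums k) (0, 0, 0)).1 ≤ t ∧
    ((List.range t).foldl (helperStep nums k) (0, 0, 0)).2.2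
      = oddPfx nums t - oddPfx nums ((List.range t).foldl (helperStep nums k) (0, 0, 0)).1 ∧
    (∀ s, s < ((List.range t).foldl (helperStep nums k) (0, 0, 0)).1 → k < oddPfx nums t - oddPfx nums s) ∧
    ((List.range t).foldl (helperStep nums k) (0, 0, 0)).2.1
      = ((List.range t).map (bCnt nums k)).sum - (if k = 0 then oddPfx nums t else 0) := by
  intro t
  induction t with
  | zero => simp [oddPfx]
  | succ t ih =>
    intro ht
    obtain ⟨h1, h2, h4, h5⟩ := ih (by omega)
    rw [List.range_succ, List.foldl_append, List.foldl_cons, List.foldl_nil]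
    set st := (List.range t).foldl (helperStep nums k) (0, 0, 0) with hstdef
    have htl : t < nums.length := by omega
    have hget : (PySem.List.pyGet? nums (t : Int)).getD 0 = nums[t] := by
      simp [PySem.List.pyGet?_natCast, List.getElem?_eq_getElem htl]
    have hd01 : oddPfx nums (t + 1) - oddPfx nums t = 0 ∨ oddPfx nums (t + 1) - oddPfx nums t = 1 := by
      rw [oddPfx_succ nums htl]; split <;> omega
    have hm1 : (if PySem.Int.mod ((PySem.List.pyGet? nums (t : Int)).getD 0) 2 == 1
        then st.2.2 + 1 else st.2.2) = oddPfx nums (t + 1) - oddPfx nums st.1 := by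
      rw [hget, h2, oddPfx_succ nums htl]; split <;> omega
    obtain ⟨ws', heq, hws1, hws2, hws3, hws4⟩ :=
      while_spec nums k hk (t + 1) (by omega) (t + 1) st.1 (by omega) (by omega)
    have hstep : helperStep nums k st t
        = (ws', st.2.1 + ((t : Int) - (ws' : Int)), oddPfx nums (t + 1) - oddPfx nums ws') := by
      unfold helperStep
      simp only []
      rw [hm1, heq]
    rw [hstep]
    have hbig : ∀ s, s < ws' → k < oddPfx nums (t + 1) - oddPfx nums s := by
      intro s hs
      by_cases hsw : s < st.1
      · have ha := h4 s hsw
        have hb := oddPfx_mono nums (Nat.le_succ t)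
        omega
      · exact hws4 s (by omega) hs
    refine ⟨hws2, rfl, hbig, ?_⟩
    have hb : bCnt nums k t = if ws' ≤ t then ((t : Int) - (ws' : Int)) else 0 := by
      unfold bCnt
      have hpred : ∀ i ∈ List.range t,
          (decide (oddPfx nums (t + 1) - oddPfx nums i ≤ k)) = true ↔ decide (ws' ≤ i) = true := by
        intro i hi
        rw [List.mem_range] at hi
        by_cases hiw : ws' ≤ i
        · have := oddPfx_mono nums hiw
          simp only [decide_eq_true_eq]
          constructor <;> intro <;> omega
        · have := hbig i (by omega)
          simp only [decide_eq_true_eq]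
          constructor <;> intro <;> omega
      rw [List.countP_congr hpred, countP_range_le]
      by_cases hw : ws' ≤ t
      · rw [if_pos hw]; omega
      · rw [if_neg hw]; omega
    simp only []
    rw [h5, List.map_append, List.sum_append]
    simp only [List.map_cons, List.map_nil, List.sum_cons, List.sum_nil]
    by_cases hw : ws' ≤ t
    · -- no overshoot: when k = 0, nums[t] must be even here
      have hcorr : (if k = 0 then oddPfx nums (t + 1) else 0) = (if k = 0 then oddPfx nums t else 0) := by
        by_cases hk0 : k = 0
        · simp only [hk0, if_true]
          have hmono : oddPfx nums ws' ≤ oddPfx nums t := oddPfx_mono nums hw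
          subst hk0
          omega
        · simp [hk0]
      rw [hb, hcorr]
      simp [hw]
      ring
    · -- overshoot: ws' = t + 1, which forces k = 0 and nums[t] odd; A adds -1
      have hws'' : ws' = t + 1 := by omega
      have hodd := hbig t (by omega)
      have hk0 : k = 0 := by omega
      have h1' : oddPfx nums (t + 1) - oddPfx nums t = 1 := by omega
      rw [hb, hk0]
      simp [hw]
      subst hws''
      push_cast
      omega

lemma oddPfx_len (nums : List Int) :
    oddPfx nums nums.length = (nums.countP (fun x => PySem.Int.mod x 2 == 1) : Int) := by
  unfold oddPfx; rw [List.take_length]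

lemma helper_eq_sub (nums : List Int) (k : Int) (hk : 0 ≤ k) :
    helper nums k = helper_alt nums k - (if k = 0 then oddPfx nums nums.length else 0) := by
  rw [helper_alt_eq]
  unfold helper
  exact (helper_loop_inv nums k hk nums.length (le_refl _)).2.2.2

-- evaluation of port A at the difference witness ([1], 0)
lemma helperWhile_wit2 : helperWhile [(1:Int)] 0 1 0 = (1, 0) := by
  rw [helperWhile]; norm_num

lemma helperWhile_wit1 : helperWhile [(1:Int)] 0 0 1 = (1, 0) := by
  rw [helperWhile]
  norm_num
  split
  · rename_i v hv
    have hv' : PySem.List.pyGet? [(1:Int)] ((0:Nat):Int) = some 1 := by decide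
    rw [hv'] at hv
    injection hv with hv
    subst hv
    rw [if_pos (by decide)]
    exact helperWhile_wit2
  · rename_i hv
    exact absurd hv (by decide)

lemma helper_wit : helper [(1:Int)] 0 = -1 := by
  simp [helper, helperStep, List.range_succ, helperWhile_wit1,
    PySem.List.pyGet?, PySem.List.pyIdx?, PySem.Int.mod]

-- ===== VERDICT (by name: the statement is the Claim_ definition above) =====
theorem helper_spec : Claim_unchanged_helper := by
  intro nums k _ hpre hnd
  rcases hpre with hk | hnil
  · rw [helper_eq_sub nums k hk]
    have hz : (if k = 0 then oddPfx nums nums.length else 0) = 0 := by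
      by_cases hk0 : k = 0
      · rw [if_pos hk0, oddPfx_len]
        have hno : ¬ nums.any (fun x => PySem.Int.mod x 2 == 1) = true := fun ha => hnd ⟨hk0, ha⟩
        have hc : nums.countP (fun x => PySem.Int.mod x 2 == 1) = 0 := by
          rw [List.countP_eq_zero]
          intro x hx hpx
          exact hno (List.any_eq_true.mpr ⟨x, hx, hpx⟩)
        rw [hc]; rfl
      · rw [if_neg hk0]
    rw [hz, sub_zero]
  · subst hnil; rfl

theorem helper_changed : Claim_changed_helper := by
  unfold Claim_changed_helper
  exact ⟨by decide, by decide, by decide, helper_wit, by decide, by decide⟩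

theorem helper_tight : Claim_exact_helper := by
  intro nums k _ _ hD
  obtain ⟨hk0, hodd⟩ := hD
  rw [helper_eq_sub nums k (by omega), if_pos hk0, oddPfx_len]
  have hpos : 0 < nums.countP (fun x => PySem.Int.mod x 2 == 1) := by
    rw [List.countP_pos_iff]
    obtain ⟨x, hx, hpx⟩ := List.any_eq_true.mp hodd
    exact ⟨x, hx, hpx⟩
  intro heq
  omega
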